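-- pv_equiv track=rewrite | github.com/shaongitbd/memebot | meme_bot.py | _encode_memegen_text
-- ===== SOURCE A (Python) =====
-- def _encode_memegen_text(text: str) -> str:
--     """Encode text for memegen.link URL paths per their spec."""
--     text = text.strip()
--     if not text:
--         return '_'
--     replacements = [
--         ('-', '--'),
--         ('_', '__'),
--         (' ', '_'),
--         ('?', '~q'),
--         ('&', '~a'),
--         ('%', '~p'),
--         ('#', '~h'),
--         ('/', '~s'),
--         ('\\', '~b'),
--         ('"', "''"),
--     ]
--     for old, new in replacements:
--         text = text.replace(old, new)
--     return text
-- ===== SOURCE B (Python) =====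
-- def _encode_memegen_text(text: str) -> str:
--     """Encode text for memegen.link URL paths per their spec."""
--     text = text.strip()
--     if not text:
--         return '_'
--     mapping = {'-': '--', '_': '__', ' ': '_', '?': '~q', '&': '~a',
--                '%': '~p', '#': '~h', '/': '~s', '\\': '~b', '"': "''"}
--     parts = []
--     for ch in text:
--         parts.append(mapping.get(ch, ch))
--     return ''.join(parts)
-- ===== Notes on version B (the rewrite author's own statement) =====
-- stated objective: simpler
-- what changed: Ten sequential full-string replace passes are replaced by a single character loop with a lookup dict mapping each special character to its escape, joining the translations.
import Mathlib
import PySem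

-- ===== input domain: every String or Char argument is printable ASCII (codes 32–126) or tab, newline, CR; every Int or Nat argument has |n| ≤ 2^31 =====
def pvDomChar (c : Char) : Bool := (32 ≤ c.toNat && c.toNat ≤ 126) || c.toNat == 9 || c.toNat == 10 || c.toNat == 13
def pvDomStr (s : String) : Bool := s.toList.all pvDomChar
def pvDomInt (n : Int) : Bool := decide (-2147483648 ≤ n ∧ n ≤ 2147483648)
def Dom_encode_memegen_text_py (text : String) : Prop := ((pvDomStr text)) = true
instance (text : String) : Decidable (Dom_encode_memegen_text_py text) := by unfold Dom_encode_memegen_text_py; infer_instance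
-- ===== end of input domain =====

-- B replaces A's ten sequential full-string replace passes by ONE pass over the
-- characters with a lookup table (dict), appending each translation; objective: simpler.

-- ===== PORT A =====
def encode_memegen_text_py (text : String) : String :=
  let text := PySem.Str.strip text
  if text = "" then "_"
  else
    let text := PySem.Str.replace text "-" "--"
    let text := PySem.Str.replace text "_" "__"
    let text := PySem.Str.replace text " " "_"
    let text := PySem.Str.replace text "?" "~q"
    let text := PySem.Str.replace text "&" "~a"
    let text := PySem.Str.replace text "%" "~p"
    let text := PySem.Str.replace text "#" "~h"
    let text := PySem.Str.replace text "/" "~s"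
    let text := PySem.Str.replace text "\\" "~b"
    let text := PySem.Str.replace text "\"" "''"
    text

-- ===== PORT B =====
def memegenMapping : PySem.Dict Char String :=
  PySem.Dict.mk [('-', "--"), ('_', "__"), (' ', "_"), ('?', "~q"), ('&', "~a"),
                 ('%', "~p"), ('#', "~h"), ('/', "~s"), ('\\', "~b"), ('"', "''")]

def encode_memegen_text_py_alt (text : String) : String :=
  let text := PySem.Str.strip text
  if text = "" then "_"
  else
    let parts := text.toList.foldl
      (fun acc ch => acc ++ [memegenMapping.getD ch (String.ofList [ch])]) []
    PySem.Str.join "" parts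

-- ===== PRECONDITION & SPEC =====
def Spec_encode_memegen_text_py (text : String) (out : String) : Prop := out = encode_memegen_text_py_alt text
instance (text : String) (out : String) : Decidable (Spec_encode_memegen_text_py text out) := by unfold Spec_encode_memegen_text_py; infer_instance

-- ===== CLAIM (what is proved, stated in full; the proofs are below) =====
def Claim_equal_encode_memegen_text_py : Prop := ∀ (text : String), Dom_encode_memegen_text_py text → Spec_encode_memegen_text_py text (encode_memegen_text_py text)

-- ===== LEMMAS AND PROOFS =====

-- B's per-character translation, on lists of characters
def encChar (c : Char) : List Char :=
  (memegenMapping.getD c (String.ofList [c])).toList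

-- single-character replace is a flatMap over the characters
theorem replace_go_single (c : Char) (new : List Char) :
    ∀ (l acc : List Char) (fuel : Nat), l.length ≤ fuel →
      PySem.Chars.replace.go [c] new fuel l acc =
        acc.reverse ++ l.flatMap (fun x => if x = c then new else [x]) := by
  intro l
  induction l with
  | nil =>
    intro acc fuel _
    cases fuel <;> simp [PySem.Chars.replace.go]
  | cons x t ih =>
    intro acc fuel hf
    cases fuel with
    | zero => simp at hf
    | succ n =>
      rw [PySem.Chars.replace.go]
      by_cases hx : x = c
      · subst hx
        have hp : [x].isPrefixOf (x :: t) = true := by simp [List.isPrefixOf]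
        rw [if_pos hp]
        have hd : List.drop [x].length (x :: t) = t := rfl
        simp only [List.length_cons] at hf
        rw [hd, ih (new.reverse ++ acc) n (by omega)]
        simp
      · have hp : [c].isPrefixOf (x :: t) = false := by
          simp [List.isPrefixOf]; exact fun h => absurd h.symm hx
        rw [if_neg (by simp [hp])]
        simp only [List.length_cons] at hf
        rw [ih (x :: acc) n (by omega)]
        simp [hx]

theorem replace_single (c : Char) (new l : List Char) :
    PySem.Chars.replace l [c] new = l.flatMap (fun x => if x = c then new else [x]) := by
  rw [PySem.Chars.replace]
  simp only [List.isEmpty_cons, Bool.false_eq_true, if_false]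
  simpa using replace_go_single c new l [] l.length Nat.le.refl

-- A's ten passes, composed on character lists
def chainA (l : List Char) : List Char :=
  let l := PySem.Chars.replace l ['-'] ['-', '-']
  let l := PySem.Chars.replace l ['_'] ['_', '_']
  let l := PySem.Chars.replace l [' '] ['_']
  let l := PySem.Chars.replace l ['?'] ['~', 'q']
  let l := PySem.Chars.replace l ['&'] ['~', 'a']
  let l := PySem.Chars.replace l ['%'] ['~', 'p']
  let l := PySem.Chars.replace l ['#'] ['~', 'h']
  let l := PySem.Chars.replace l ['/'] ['~', 's']
  let l := PySem.Chars.replace l ['\\'] ['~', 'b']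
  let l := PySem.Chars.replace l ['"'] ['\'', '\'']
  l

theorem chainA_eq_flatMap (l : List Char) : chainA l = l.flatMap encChar := by
  unfold chainA
  simp only [replace_single, List.flatMap_assoc]
  apply List.flatMap_congr
  intro c _
  by_cases h1 : c = '-';  · subst h1; decide
  by_cases h2 : c = '_';  · subst h2; decide
  by_cases h3 : c = ' ';  · subst h3; decide
  by_cases h4 : c = '?';  · subst h4; decide
  by_cases h5 : c = '&';  · subst h5; decide
  by_cases h6 : c = '%';  · subst h6; decide
  by_cases h7 : c = '#';  · subst h7; decide
  by_cases h8 : c = '/';  · subst h8; decide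
  by_cases h9 : c = '\\'; · subst h9; decide
  by_cases h10 : c = '"'; · subst h10; decide
  have g1 : ('-' == c) = false := beq_eq_false_iff_ne.mpr (fun h => h1 h.symm)
  have g2 : ('_' == c) = false := beq_eq_false_iff_ne.mpr (fun h => h2 h.symm)
  have g3 : (' ' == c) = false := beq_eq_false_iff_ne.mpr (fun h => h3 h.symm)
  have g4 : ('?' == c) = false := beq_eq_false_iff_ne.mpr (fun h => h4 h.symm)
  have g5 : ('&' == c) = false := beq_eq_false_iff_ne.mpr (fun h => h5 h.symm)
  have g6 : ('%' == c) = false := beq_eq_false_iff_ne.mpr (fun h => h6 h.symm)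
  have g7 : ('#' == c) = false := beq_eq_false_iff_ne.mpr (fun h => h7 h.symm)
  have g8 : ('/' == c) = false := beq_eq_false_iff_ne.mpr (fun h => h8 h.symm)
  have g9 : ('\\' == c) = false := beq_eq_false_iff_ne.mpr (fun h => h9 h.symm)
  have g10 : ('"' == c) = false := beq_eq_false_iff_ne.mpr (fun h => h10 h.symm)
  simp [h1, h2, h3, h4, h5, h6, h7, h8, h9, h10, encChar, memegenMapping,
        PySem.Dict.getD, PySem.Dict.get?, List.find?, g1, g2, g3, g4, g5, g6, g7, g8, g9, g10]

theorem intersperse_nil_flatten (l : List (List Char)) :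
    (List.intersperse ([] : List Char) l).flatten = l.flatten := by
  induction l with
  | nil => rfl
  | cons x t ih => cases t <;> simp_all [List.intersperse]

-- ===== VERDICT (by name: the statement is the Claim_ definition above) =====
theorem encode_memegen_text_py_spec : Claim_equal_encode_memegen_text_py := by
  intro text _
  unfold Spec_encode_memegen_text_py encode_memegen_text_py encode_memegen_text_py_alt
  set s := PySem.Str.strip text with hs
  by_cases h : s = ""
  · simp [h]
  · simp only [if_neg h]
    have hA : (PySem.Str.replace (PySem.Str.replace (PySem.Str.replace (PySem.Str.replace
        (PySem.Str.replace (PySem.Str.replace (PySem.Str.replace (PySem.Str.replace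
        (PySem.Str.replace (PySem.Str.replace s "-" "--") "_" "__") " " "_") "?" "~q")
        "&" "~a") "%" "~p") "#" "~h") "/" "~s") "\\" "~b") "\"" "''")
        = String.ofList (chainA s.toList) := by
      have hx : (PySem.Str.replace (PySem.Str.replace (PySem.Str.replace (PySem.Str.replace
          (PySem.Str.replace (PySem.Str.replace (PySem.Str.replace (PySem.Str.replace
          (PySem.Str.replace (PySem.Str.replace s "-" "--") "_" "__") " " "_") "?" "~q")
          "&" "~a") "%" "~p") "#" "~h") "/" "~s") "\\" "~b") "\"" "''").toList
          = chainA s.toList := by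
        simp only [PySem.Str.toList_replace,
          show "-".toList = ['-'] from by decide, show "--".toList = ['-','-'] from by decide,
          show "_".toList = ['_'] from by decide, show "__".toList = ['_','_'] from by decide,
          show " ".toList = [' '] from by decide, show "?".toList = ['?'] from by decide,
          show "~q".toList = ['~','q'] from by decide, show "&".toList = ['&'] from by decide,
          show "~a".toList = ['~','a'] from by decide, show "%".toList = ['%'] from by decide,
          show "~p".toList = ['~','p'] from by decide, show "#".toList = ['#'] from by decide,
          show "~h".toList = ['~','h'] from by decide, show "/".toList = ['/'] from by decide,
          show "~s".toList = ['~','s'] from by decide, show "\\".toList = ['\\'] from by decide,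
          show "~b".toList = ['~','b'] from by decide, show "\"".toList = ['"'] from by decide,
          show "''".toList = ['\'','\''] from by decide]
        rfl
      calc _ = String.ofList ((PySem.Str.replace (PySem.Str.replace (PySem.Str.replace (PySem.Str.replace
          (PySem.Str.replace (PySem.Str.replace (PySem.Str.replace (PySem.Str.replace
          (PySem.Str.replace (PySem.Str.replace s "-" "--") "_" "__") " " "_") "?" "~q")
          "&" "~a") "%" "~p") "#" "~h") "/" "~s") "\\" "~b") "\"" "''").toList) := String.ofList_toList.symm
      _ = String.ofList (chainA s.toList) := by rw [hx]
    rw [hA, chainA_eq_flatMap]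
    rw [PySem.Str.join]
    refine congrArg String.ofList ?_
    rw [PySem.List.foldl_append_eq_flatMap]
    simp only [List.nil_append, show "".toList = [] from rfl]
    rw [PySem.Chars.join, List.intercalate, intersperse_nil_flatten]
    have h1 : List.flatMap (fun ch => [memegenMapping.getD ch (String.ofList [ch])]) s.toList
        = List.map (fun ch => memegenMapping.getD ch (String.ofList [ch])) s.toList := Eq.symm List.map_eq_flatMap
    rw [h1, List.map_map, List.flatMap_def]
    rfl
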